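-- pv_equiv track=rewrite | github.com/HaujetZhao/color-trace | color_trace_multi.py | get_nonpalette_color
-- ===== SOURCE A (Python) =====
-- def get_nonpalette_color(palette, start_black=True, additional=None):
--     """return a color hex string not listed in palette
--
--     start_black: start searching for colors starting at black, else white
--     additional: if specified, a list of additional colors to avoid returning
-- """
--     if additional is None:
--         palette_ = tuple(palette)
--     else:
--         palette_ = tuple(palette) + tuple(additional)
--     if start_black:
--         color_range = range(int('ffffff', 16))
--     else:
--         color_range = range(int('ffffff', 16), 0, -1)
--     for i in color_range:
--         color = "#{0:06x}".format(i)
--         if color not in palette_: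
--             return color
--     #will fail in the case that palette+additional includes all colors #000000-#ffffff
--     raise Exception("All colors exhausted, could not find a nonpalette color")
-- ===== SOURCE B (Python) =====
-- def get_nonpalette_color(palette, start_black=True, additional=None):
--     """return a color hex string not listed in palette
--
--     start_black: start searching for colors starting at black, else white
--     additional: if specified, a list of additional colors to avoid returning
-- """
--     colors = list(palette) + (list(additional) if additional is not None else [])
--     # Only strings of the exact form '#' + 6 lowercase hex digits can ever equal
--     # a candidate '#{0:06x}'.format(i) with 0 <= i < 0x1000000; collect their values.
--     hexdigits = '0123456789abcdef'
--     blocked = set()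
--     for c in colors:
--         if len(c) == 7 and c[0] == '#' and all(ch in hexdigits for ch in c[1:]):
--             blocked.add(int(c[1:], 16))
--     if start_black:
--         cand = 0
--         for b in sorted(blocked):
--             if b == cand:
--                 cand += 1
--             elif b > cand:
--                 break
--         if cand <= 0xfffffe:
--             return '#{0:06x}'.format(cand)
--     else:
--         cand = 0xffffff
--         for b in sorted(blocked, reverse=True):
--             if b == cand:
--                 cand -= 1
--             elif b < cand:
--                 break
--         if cand >= 1:
--             return '#{0:06x}'.format(cand)
--     raise Exception("All colors exhausted, could not find a nonpalette color")
-- ===== Notes on version B (the rewrite author's own statement) =====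
-- stated objective: alternative
-- what changed: Instead of scanning up to 16^6 candidate colors and doing a linear palette membership test for each, B parses once the palette entries that are in canonical '#'+6-lowercase-hex form into integers, sorts that set, and walks it to the first gap in the searched range, formatting only the answer; it trades A's candidate-by-candidate scan for one pass over the palette plus a sort.
import Mathlib
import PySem

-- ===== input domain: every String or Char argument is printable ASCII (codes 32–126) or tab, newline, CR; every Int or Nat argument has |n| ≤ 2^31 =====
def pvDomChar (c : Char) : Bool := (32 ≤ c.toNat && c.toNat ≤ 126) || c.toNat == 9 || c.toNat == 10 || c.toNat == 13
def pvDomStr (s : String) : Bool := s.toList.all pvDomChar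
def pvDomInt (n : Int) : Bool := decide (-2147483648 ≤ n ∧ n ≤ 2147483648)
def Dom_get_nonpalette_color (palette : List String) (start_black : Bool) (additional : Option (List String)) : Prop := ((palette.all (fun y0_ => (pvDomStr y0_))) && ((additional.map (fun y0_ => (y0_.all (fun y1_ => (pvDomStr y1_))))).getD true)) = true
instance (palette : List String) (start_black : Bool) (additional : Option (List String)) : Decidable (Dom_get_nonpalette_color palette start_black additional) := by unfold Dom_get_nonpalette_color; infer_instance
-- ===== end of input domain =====

-- B replaces A's scan over up to 16^6 candidate colors (each tested by a linear palette scan) by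
-- parsing the palette entries that can collide with a candidate into integers once and walking the
-- sorted blocked integers to the first gap (objective: alternative algorithm of similar cost).

-- ===== PORT A =====
-- "#{0:06x}".format(i): exact for 0 ≤ i < 16^6 (the only values either program formats):
-- '#' followed by six lowercase hex digits.
def pvHexChar (d : Nat) : Char := if d < 10 then Char.ofNat (48 + d) else Char.ofNat (87 + d)
def pvHex6 (n : Nat) : String :=
  String.ofList ['#', pvHexChar (n / 1048576 % 16), pvHexChar (n / 65536 % 16),
    pvHexChar (n / 4096 % 16), pvHexChar (n / 256 % 16), pvHexChar (n / 16 % 16), pvHexChar (n % 16)]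

-- 'for i in range(0xffffff): …' with early return; "" stands for the final raise (excluded by Pre_).
def pvLoopBlack (palette_ : List String) (i : Nat) : String :=
  if _h : i < 16777215 then
    let color := pvHex6 i
    if palette_.contains color then pvLoopBlack palette_ (i + 1) else color
  else ""
termination_by 16777215 - i

-- 'for i in range(0xffffff, 0, -1): …' with early return; "" stands for the final raise (excluded by Pre_).
def pvLoopWhite (palette_ : List String) (i : Nat) : String :=
  if _h : 1 ≤ i then
    let color := pvHex6 i
    if palette_.contains color then pvLoopWhite palette_ (i - 1) else color
  else ""
termination_by i

def get_nonpalette_color (palette : List String) (start_black : Bool) (additional : Option (List String)) : String :=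
  let palette_ : List String := match additional with | none => palette | some a => palette ++ a
  if start_black then pvLoopBlack palette_ 0 else pvLoopWhite palette_ 16777215

-- ===== PORT B =====
-- ch in '0123456789abcdef': exact, membership in that literal = these two code ranges.
def pvIsHexLower (ch : Char) : Bool := (48 ≤ ch.toNat && ch.toNat ≤ 57) || (97 ≤ ch.toNat && ch.toNat ≤ 102)
-- len(c) == 7 and c[0] == '#' and all(ch in hexdigits for ch in c[1:])
def pvCanonical (c : String) : Bool :=
  match c.toList with
  | '#' :: ds => ds.length == 6 && ds.all pvIsHexLower
  | _ => false
def pvHexVal (ch : Char) : Nat := if ch.toNat ≤ 57 then ch.toNat - 48 else ch.toNat - 87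
-- int(c[1:], 16): exact on the strings pvCanonical accepts (six lowercase hex digits).
def pvParseHex (c : String) : Int := (c.toList.drop 1).foldl (fun a ch => 16 * a + (pvHexVal ch : Int)) 0
def pvBlocked (colors : List String) : PySem.Set Int :=
  colors.foldl (fun s c => if pvCanonical c then PySem.Set.add s (pvParseHex c) else s) []

-- 'for b in sorted(blocked): if b == cand: cand += 1; elif b > cand: break'
def pvWalkUp (cand : Int) : List Int → Int
  | [] => cand
  | b :: rest => if b = cand then pvWalkUp (cand + 1) rest else if cand < b then cand else pvWalkUp cand rest

-- 'for b in sorted(blocked, reverse=True): if b == cand: cand -= 1; elif b < cand: break'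
def pvWalkDown (cand : Int) : List Int → Int
  | [] => cand
  | b :: rest => if b = cand then pvWalkDown (cand - 1) rest else if b < cand then cand else pvWalkDown cand rest

def get_nonpalette_color_alt (palette : List String) (start_black : Bool) (additional : Option (List String)) : String :=
  let colors : List String := palette ++ (match additional with | none => [] | some a => a)
  let blocked : PySem.Set Int := pvBlocked colors
  if start_black then
    let cand := pvWalkUp 0 (PySem.List.sorted blocked (fun x => x) false)
    if cand ≤ 16777214 then pvHex6 cand.toNat else ""
  else
    let cand := pvWalkDown 16777215 (PySem.List.sorted blocked (fun x => x) true)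
    if 1 ≤ cand then pvHex6 cand.toNat else ""

-- ===== PRECONDITION & SPEC =====
-- Pre_ excludes exactly the inputs on which A raises its Exception: palette+additional already
-- contain every color of the searched range (all of #000000..#fffffe for start_black, else all of
-- #000001..#ffffff), so no nonpalette color exists; on every input where A returns, Pre_ holds.
def Pre_get_nonpalette_color (palette : List String) (start_black : Bool) (additional : Option (List String)) : Prop :=
  let vals := pvBlocked (palette ++ (match additional with | none => [] | some a => a))
  if start_black then (vals.filter (fun v => v < 16777215)).length < 16777215
  else (vals.filter (fun v => 1 ≤ v)).length < 16777215
instance (palette : List String) (start_black : Bool) (additional : Option (List String)) : Decidable (Pre_get_nonpalette_color palette start_black additional) := by unfold Pre_get_nonpalette_color; infer_instance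

def pvWitness_get_nonpalette_color : List String × Bool × Option (List String) :=
  (["#000000", "#000001"], true, some ["#ffffff", "nonsense"])

def Spec_get_nonpalette_color (palette : List String) (start_black : Bool) (additional : Option (List String)) (out : String) : Prop := out = get_nonpalette_color_alt palette start_black additional
instance (palette : List String) (start_black : Bool) (additional : Option (List String)) (out : String) : Decidable (Spec_get_nonpalette_color palette start_black additional out) := by unfold Spec_get_nonpalette_color; infer_instance

-- ===== CLAIM (what is proved, stated in full; the proofs are below) =====
def Claim_equal_get_nonpalette_color : Prop := ∀ (palette : List String) (start_black : Bool) (additional : Option (List String)), Dom_get_nonpalette_color palette start_black additional → Pre_get_nonpalette_color palette start_black additional → Spec_get_nonpalette_color palette start_black additional (get_nonpalette_color palette start_black additional)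

-- ===== LEMMAS AND PROOFS =====

theorem pvWitness_ok :
    Dom_get_nonpalette_color pvWitness_get_nonpalette_color.1 pvWitness_get_nonpalette_color.2.1 pvWitness_get_nonpalette_color.2.2 ∧
    Pre_get_nonpalette_color pvWitness_get_nonpalette_color.1 pvWitness_get_nonpalette_color.2.1 pvWitness_get_nonpalette_color.2.2 := by
  decide

-- digit ↔ char facts
theorem pvHexChar_isHexLower (d : Nat) (h : d < 16) : pvIsHexLower (pvHexChar d) = true := by
  interval_cases d <;> decide

theorem pvHexVal_hexChar (d : Nat) (h : d < 16) : pvHexVal (pvHexChar d) = d := by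
  interval_cases d <;> decide

theorem pvHexChar_hexVal (ch : Char) (h : pvIsHexLower ch = true) :
    pvHexChar (pvHexVal ch) = ch ∧ pvHexVal ch < 16 := by
  simp [pvIsHexLower] at h
  unfold pvHexChar pvHexVal
  rcases h with ⟨h1, h2⟩ | ⟨h1, h2⟩
  · rw [if_pos (show ch.toNat ≤ 57 by omega), if_pos (show ch.toNat - 48 < 10 by omega)]
    refine ⟨?_, by omega⟩
    have : 48 + (ch.toNat - 48) = ch.toNat := by omega
    rw [this, Char.ofNat_toNat]
  · rw [if_neg (show ¬ ch.toNat ≤ 57 by omega), if_neg (show ¬ ch.toNat - 87 < 10 by omega)]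
    refine ⟨?_, by omega⟩
    have : 87 + (ch.toNat - 87) = ch.toNat := by omega
    rw [this, Char.ofNat_toNat]

-- roundtrips between formatting and the canonical-entry parse
theorem pvCanonical_hex6 (n : Nat) : pvCanonical (pvHex6 n) = true := by
  simp [pvCanonical, pvHex6, String.toList_ofList]
  refine ⟨?_, ?_, ?_, ?_, ?_, ?_⟩ <;> exact pvHexChar_isHexLower _ (Nat.mod_lt _ (by norm_num))

theorem pvParseHex_hex6 (n : Nat) (h : n < 16777216) : pvParseHex (pvHex6 n) = (n : Int) := by
  simp [pvParseHex, pvHex6, String.toList_ofList, List.foldl,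
    pvHexVal_hexChar _ (Nat.mod_lt n (show 0 < 16 by norm_num)),
    pvHexVal_hexChar _ (Nat.mod_lt (n / 16) (show 0 < 16 by norm_num)),
    pvHexVal_hexChar _ (Nat.mod_lt (n / 256) (show 0 < 16 by norm_num)),
    pvHexVal_hexChar _ (Nat.mod_lt (n / 4096) (show 0 < 16 by norm_num)),
    pvHexVal_hexChar _ (Nat.mod_lt (n / 65536) (show 0 < 16 by norm_num)),
    pvHexVal_hexChar _ (Nat.mod_lt (n / 1048576) (show 0 < 16 by norm_num))]
  omega

theorem pvHex6_parseHex (c : String) (h : pvCanonical c = true) :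
    0 ≤ pvParseHex c ∧ pvParseHex c < 16777216 ∧ pvHex6 (pvParseHex c).toNat = c := by
  unfold pvCanonical at h
  split at h
  next ds hc =>
    simp at h
    obtain ⟨hlen, hall⟩ := h
    match ds, hlen, hc, hall with
    | [a1,a2,a3,a4,a5,a6], _, hc, hall =>
      simp at hall
      obtain ⟨g1,g2,g3,g4,g5,g6⟩ := hall
      obtain ⟨e1, l1⟩ := pvHexChar_hexVal a1 g1
      obtain ⟨e2, l2⟩ := pvHexChar_hexVal a2 g2
      obtain ⟨e3, l3⟩ := pvHexChar_hexVal a3 g3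
      obtain ⟨e4, l4⟩ := pvHexChar_hexVal a4 g4
      obtain ⟨e5, l5⟩ := pvHexChar_hexVal a5 g5
      obtain ⟨e6, l6⟩ := pvHexChar_hexVal a6 g6
      have hp : pvParseHex c = ((((((pvHexVal a1 * 16 + pvHexVal a2) * 16 + pvHexVal a3) * 16 + pvHexVal a4) * 16 + pvHexVal a5) * 16 + pvHexVal a6 : Nat) : Int) := by
        simp [pvParseHex, hc, List.foldl]
        ring
      refine ⟨by rw [hp]; positivity, by rw [hp]; omega, ?_⟩
      rw [hp, Int.toNat_natCast]
      rw [← String.ofList_toList (s := c), hc]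
      simp only [pvHex6]
      congr 1
      simp only [List.cons.injEq, and_true, true_and]
      set v1 := pvHexVal a1; set v2 := pvHexVal a2; set v3 := pvHexVal a3
      set v4 := pvHexVal a4; set v5 := pvHexVal a5; set v6 := pvHexVal a6
      set N : Nat := ((((v1 * 16 + v2) * 16 + v3) * 16 + v4) * 16 + v5) * 16 + v6 with hN
      refine ⟨?_, ?_, ?_, ?_, ?_, ?_⟩
      · rw [show N / 1048576 % 16 = v1 by omega]; exact e1
      · rw [show N / 65536 % 16 = v2 by omega]; exact e2
      · rw [show N / 4096 % 16 = v3 by omega]; exact e3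
      · rw [show N / 256 % 16 = v4 by omega]; exact e4
      · rw [show N / 16 % 16 = v5 by omega]; exact e5
      · rw [show N % 16 = v6 by omega]; exact e6
  next hc => simp at h

-- membership bridge: a candidate color is in the color list iff its value is blocked
theorem pvFoldAdd (colors : List String) (s : PySem.Set Int) :
    colors.foldl (fun s c => if pvCanonical c then PySem.Set.add s (pvParseHex c) else s) s
      = ((colors.filter pvCanonical).map pvParseHex).foldl PySem.Set.add s := by
  induction colors generalizing s with
  | nil => rfl
  | cons c rest ih =>
    by_cases h : pvCanonical c = true <;> simp [List.foldl, h, ih]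

theorem pvBlocked_eq (colors : List String) :
    pvBlocked colors = PySem.Set.ofList ((colors.filter pvCanonical).map pvParseHex) := by
  rw [pvBlocked, pvFoldAdd, PySem.Set.ofList_eq_foldl]

theorem pvMem_blocked' (colors : List String) (x : Int) :
    x ∈ pvBlocked colors ↔ ∃ c ∈ colors, pvCanonical c = true ∧ pvParseHex c = x := by
  rw [pvBlocked_eq, PySem.Set.mem_ofList]
  simp [List.mem_filter]
  tauto

theorem pvMem_blocked (colors : List String) (n : Nat) (h : n < 16777216) :
    colors.contains (pvHex6 n) = true ↔ (n : Int) ∈ pvBlocked colors := by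
  rw [List.contains_iff_mem, pvMem_blocked']
  constructor
  · intro hm
    exact ⟨pvHex6 n, hm, pvCanonical_hex6 n, pvParseHex_hex6 n h⟩
  · rintro ⟨c, hc, hcan, hval⟩
    obtain ⟨-, -, hfmt⟩ := pvHex6_parseHex c hcan
    rw [hval, Int.toNat_natCast] at hfmt
    rw [hfmt]
    exact hc

-- A-loop characterizations: the loop returns the format of the first unblocked candidate
theorem pvLoopBlack_eq (pal : List String) (i j : Nat) (hij : i ≤ j) (hj : j < 16777215)
    (hfree : pal.contains (pvHex6 j) = false)
    (hblock : ∀ k, i ≤ k → k < j → pal.contains (pvHex6 k) = true) :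
    pvLoopBlack pal i = pvHex6 j := by
  obtain ⟨n, hn⟩ : ∃ n, j - i = n := ⟨j - i, rfl⟩
  induction n generalizing i with
  | zero =>
    have : i = j := by omega
    subst this
    rw [pvLoopBlack, dif_pos (by omega), if_neg (by simpa using hfree)]
  | succ n ih =>
    have hlt : i < j := by omega
    rw [pvLoopBlack, dif_pos (by omega), if_pos (hblock i le_rfl hlt)]
    exact ih (i + 1) (by omega) (fun k hk1 hk2 => hblock k (by omega) hk2) (by omega)

theorem pvLoopWhite_eq (pal : List String) (i j : Nat) (hij : j ≤ i) (hj : 1 ≤ j)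
    (hfree : pal.contains (pvHex6 j) = false)
    (hblock : ∀ k, j < k → k ≤ i → pal.contains (pvHex6 k) = true) :
    pvLoopWhite pal i = pvHex6 j := by
  obtain ⟨n, hn⟩ : ∃ n, i - j = n := ⟨i - j, rfl⟩
  induction n generalizing i with
  | zero =>
    have : i = j := by omega
    subst this
    rw [pvLoopWhite, dif_pos (by omega), if_neg (by simpa using hfree)]
  | succ n ih =>
    have hlt : j < i := by omega
    rw [pvLoopWhite, dif_pos (by omega), if_pos (hblock i hlt le_rfl)]
    exact ih (i - 1) (by omega) (fun k hk1 hk2 => hblock k hk1 (by omega)) (by omega)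

-- walk specifications: the walk stops at the first gap
theorem pvWalkUp_le (cand : Int) (l : List Int) : cand ≤ pvWalkUp cand l := by
  induction l generalizing cand with
  | nil => simp [pvWalkUp]
  | cons b rest ih =>
    simp only [pvWalkUp]
    split_ifs with h1 h2
    · exact le_trans (by omega) (ih (cand + 1))
    · omega
    · exact ih cand

theorem pvWalkUp_not_mem (cand : Int) (l : List Int) (h : l.Pairwise (· ≤ ·)) :
    pvWalkUp cand l ∉ l := by
  induction l generalizing cand with
  | nil => simp
  | cons b rest ih =>
    rcases List.pairwise_cons.mp h with ⟨hb, hrest⟩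
    simp only [pvWalkUp, List.mem_cons]
    split_ifs with h1 h2
    · push Not
      refine ⟨?_, ih (cand + 1) hrest⟩
      have := pvWalkUp_le (cand + 1) rest
      omega
    · push Not
      refine ⟨by omega, fun hmem => ?_⟩
      have := hb _ hmem
      omega
    · push Not
      refine ⟨?_, ih cand hrest⟩
      have := pvWalkUp_le cand rest
      omega

theorem pvWalkUp_mem (cand : Int) (l : List Int) (k : Int) (h1 : cand ≤ k) (h2 : k < pvWalkUp cand l) :
    k ∈ l := by
  induction l generalizing cand with
  | nil => simp [pvWalkUp] at h2; omega
  | cons b rest ih =>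
    simp only [pvWalkUp] at h2
    split_ifs at h2 with g1 g2
    · rcases eq_or_lt_of_le h1 with he | hlt
      · simp [← he, g1]
      · exact List.mem_cons_of_mem _ (ih (cand + 1) (by omega) h2)
    · omega
    · exact List.mem_cons_of_mem _ (ih cand h1 h2)

theorem pvWalkDown_le (cand : Int) (l : List Int) : pvWalkDown cand l ≤ cand := by
  induction l generalizing cand with
  | nil => simp [pvWalkDown]
  | cons b rest ih =>
    simp only [pvWalkDown]
    split_ifs with h1 h2
    · exact le_trans (ih (cand - 1)) (by omega)
    · omega
    · exact ih cand

theorem pvWalkDown_not_mem (cand : Int) (l : List Int) (h : l.Pairwise (fun a b => b ≤ a)) :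
    pvWalkDown cand l ∉ l := by
  induction l generalizing cand with
  | nil => simp
  | cons b rest ih =>
    rcases List.pairwise_cons.mp h with ⟨hb, hrest⟩
    simp only [pvWalkDown, List.mem_cons]
    split_ifs with h1 h2
    · push Not
      refine ⟨?_, ih (cand - 1) hrest⟩
      have := pvWalkDown_le (cand - 1) rest
      omega
    · push Not
      refine ⟨by omega, fun hmem => ?_⟩
      have := hb _ hmem
      omega
    · push Not
      refine ⟨?_, ih cand hrest⟩
      have := pvWalkDown_le cand rest
      omega

theorem pvWalkDown_mem (cand : Int) (l : List Int) (k : Int) (h1 : k ≤ cand) (h2 : pvWalkDown cand l < k) :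
    k ∈ l := by
  induction l generalizing cand with
  | nil => simp [pvWalkDown] at h2; omega
  | cons b rest ih =>
    simp only [pvWalkDown] at h2
    split_ifs at h2 with g1 g2
    · rcases eq_or_lt_of_le h1 with he | hlt
      · simp [he, g1]
      · exact List.mem_cons_of_mem _ (ih (cand - 1) (by omega) h2)
    · omega
    · exact List.mem_cons_of_mem _ (ih cand h1 h2)

-- if an integer interval of size N is contained in a nodup list, the list has length ≥ N
theorem pvInterval_subset_length (l : List Int) (a : Int) (N : Nat)
    (h : ∀ k : Int, a ≤ k → k < a + N → k ∈ l) : N ≤ l.length := by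
  have hsub : ((List.range N).map (fun j : Nat => a + (j : Int))) ⊆ l := by
    intro x hx
    simp [List.mem_map, List.mem_range] at hx
    obtain ⟨j, hj, rfl⟩ := hx
    exact h _ (by omega) (by omega)
  have hnd2 : ((List.range N).map (fun j : Nat => a + (j : Int))).Nodup := by
    refine List.Nodup.map (fun x y hxy => by omega) List.nodup_range
  have := (List.subperm_of_subset hnd2 hsub).length_le
  simpa using this

-- the two main cases, over the already-combined color list
theorem pvBlack_case (L : List String)
    (hpre : ((pvBlocked L).filter (fun v => v < 16777215)).length < 16777215) :
    pvLoopBlack L 0 =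
      (if pvWalkUp 0 (PySem.List.sorted (pvBlocked L) (fun x => x) false) ≤ 16777214
       then pvHex6 (pvWalkUp 0 (PySem.List.sorted (pvBlocked L) (fun x => x) false)).toNat else "") := by
  set bl := pvBlocked L with hbl
  set srt := PySem.List.sorted bl (fun x => x) false with hsrt
  set r := pvWalkUp 0 srt with hr
  have hr0 : 0 ≤ r := pvWalkUp_le _ _
  have hpair : srt.Pairwise (· ≤ ·) := by
    simpa using PySem.List.sorted_pairwise (xs := bl) (key := fun x => x)
  have hmem_s : ∀ x : Int, x ∈ srt ↔ x ∈ bl := by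
    intro x; rw [hsrt]; exact PySem.List.mem_sorted bl (fun y => y) false x
  have hnotmem : r ∉ bl := fun hm => pvWalkUp_not_mem 0 srt hpair ((hmem_s r).mpr hm)
  have hmemlt : ∀ k : Int, 0 ≤ k → k < r → k ∈ bl :=
    fun k h1 h2 => (hmem_s k).mp (pvWalkUp_mem 0 srt k h1 h2)
  by_cases hcase : r ≤ 16777214
  · rw [if_pos hcase]
    apply pvLoopBlack_eq L 0 r.toNat (by omega) (by omega)
    · cases hc : L.contains (pvHex6 r.toNat) with
      | false => rfl
      | true =>
        exfalso
        have := (pvMem_blocked L r.toNat (by omega)).mp hc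
        rw [Int.toNat_of_nonneg hr0] at this
        exact hnotmem this
    · intro k hk0 hkr
      exact (pvMem_blocked L k (by omega)).mpr (hmemlt k (by omega) (by omega))
  · exfalso
    have hsubf : ∀ k : Int, 0 ≤ k → k < 0 + (16777215 : Nat) →
        k ∈ bl.filter (fun v => v < 16777215) := by
      intro k h1 h2
      rw [List.mem_filter]
      exact ⟨hmemlt k h1 (by push_cast at h2 ⊢; omega), by push_cast at h2; simp; omega⟩
    have := pvInterval_subset_length _ 0 16777215 hsubf
    omega

theorem pvWhite_case (L : List String)
    (hpre : ((pvBlocked L).filter (fun v => 1 ≤ v)).length < 16777215) :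
    pvLoopWhite L 16777215 =
      (if 1 ≤ pvWalkDown 16777215 (PySem.List.sorted (pvBlocked L) (fun x => x) true)
       then pvHex6 (pvWalkDown 16777215 (PySem.List.sorted (pvBlocked L) (fun x => x) true)).toNat else "") := by
  set bl := pvBlocked L with hbl
  set srt := PySem.List.sorted bl (fun x => x) true with hsrt
  set r := pvWalkDown 16777215 srt with hr
  have hrtop : r ≤ 16777215 := pvWalkDown_le _ _
  have hpair : srt.Pairwise (fun a b => b ≤ a) := by
    simpa using PySem.List.sorted_pairwise_rev (xs := bl) (key := fun x => x)
  have hmem_s : ∀ x : Int, x ∈ srt ↔ x ∈ bl := by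
    intro x; rw [hsrt]; exact PySem.List.mem_sorted bl (fun y => y) true x
  have hnotmem : r ∉ bl := fun hm => pvWalkDown_not_mem 16777215 srt hpair ((hmem_s r).mpr hm)
  have hmemgt : ∀ k : Int, r < k → k ≤ 16777215 → k ∈ bl :=
    fun k h1 h2 => (hmem_s k).mp (pvWalkDown_mem 16777215 srt k h2 h1)
  by_cases hcase : 1 ≤ r
  · rw [if_pos hcase]
    apply pvLoopWhite_eq L 16777215 r.toNat (by omega) (by omega)
    · cases hc : L.contains (pvHex6 r.toNat) with
      | false => rfl
      | true =>
        exfalso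
        have := (pvMem_blocked L r.toNat (by omega)).mp hc
        rw [Int.toNat_of_nonneg (by omega)] at this
        exact hnotmem this
    · intro k hk0 hkr
      exact (pvMem_blocked L k (by omega)).mpr (hmemgt k (by omega) (by omega))
  · exfalso
    have hsubf : ∀ k : Int, 1 ≤ k → k < 1 + (16777215 : Nat) →
        k ∈ bl.filter (fun v => 1 ≤ v) := by
      intro k h1 h2
      rw [List.mem_filter]
      exact ⟨hmemgt k (by omega) (by push_cast at h2; omega), by simp; omega⟩
    have := pvInterval_subset_length _ 1 16777215 hsubf
    omega

-- ===== VERDICT (by name: the statement is the Claim_ definition above) =====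
theorem get_nonpalette_color_spec : Claim_equal_get_nonpalette_color := by
  intro palette start_black additional _dom hpre
  unfold Spec_get_nonpalette_color get_nonpalette_color get_nonpalette_color_alt
  unfold Pre_get_nonpalette_color at hpre
  cases additional with
  | none =>
    simp only [List.append_nil] at hpre ⊢
    cases start_black with
    | true => simpa using pvBlack_case palette (by simpa using hpre)
    | false => simpa using pvWhite_case palette (by simpa using hpre)
  | some a =>
    cases start_black with
    | true => simpa using pvBlack_case (palette ++ a) (by simpa using hpre)
    | false => simpa using pvWhite_case (palette ++ a) (by simpa using hpre)
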